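-- pv_equiv track=rewrite | github.com/mars887/neusort | clustering.py | _candidate_starts_for_cluster
-- ===== SOURCE A (Python) =====
-- from typing import Dict, List, Optional, Sequence, Tuple
--
-- def _candidate_starts_for_cluster(desired: int, length: int, current_len: int, group_size: int) -> List[int]:
--     """
--     Generate candidate insertion indices based on group alignment rules.
--
--     - If size < group_size: Candidates must fit entirely within a single group.
--       We check the groups that 'desired' touches or is adjacent to.
--     - If size >= group_size: We check the range covering the groups the cluster would
--       occupy at 'desired', allowing shifts from edge to edge of those groups.
--     """
--     # Always include the exact desired position (clamped) as a fallback/baseline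
--     candidates = {max(0, min(desired, current_len))}
--
--     if group_size <= 0:
--         return sorted(list(candidates))
--
--     # Identify the range of groups we are interested in
--     # We look at the group where 'desired' starts, and where 'desired + length' ends.
--     start_g = desired // group_size
--     end_g = (desired + length) // group_size
--
--     # We broaden the search slightly to ensure we check adjacent group options
--     # if we are near a boundary
--     groups_to_check = range(max(0, start_g - 1), end_g + 2)
--
--     for g in groups_to_check:
--         g_start = g * group_size
--         g_end = g_start + group_size
--
--         if length < group_size:
--             # Constaint: Cluster must be strictly inside [g_start, g_end]
--             # Max start index is g_end - length
--             valid_start_min = g_start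
--             valid_start_max = g_end - length
--         else:
--             # Constraint: Cluster spans multiple groups.
--             # We allow starting anywhere in this group context, effectively sliding
--             # the large cluster through this group frame.
--             valid_start_min = g_start
--             valid_start_max = g_end # We can start even at the very end of this group
--
--         # Validate bounds against logic
--         if valid_start_max < valid_start_min:
--             continue
--
--         # Generate range, clamping to actual sequence length
--         for s in range(valid_start_min, valid_start_max + 1):
--             if 0 <= s <= current_len:
--                 candidates.add(s)
--
--     return sorted(list(candidates))
-- ===== SOURCE B (Python) =====
-- def _candidate_starts_for_cluster(desired: int, length: int, current_len: int, group_size: int) -> list: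
--     """Interval-union formulation: each group contributes one clamped interval of
--     valid start positions; merge the start-sorted intervals while emitting, so the
--     result comes out sorted and deduplicated directly."""
--     base = max(0, min(desired, current_len))
--     if group_size <= 0:
--         return [base]
--     g_lo = max(0, desired // group_size - 1)
--     g_hi = (desired + length) // group_size + 1
--     width = group_size if length >= group_size else group_size - length
--     intervals = [(base, base)]
--     for g in range(g_lo, g_hi + 1):
--         lo = g * group_size
--         if lo <= current_len:
--             intervals.append((lo, min(lo + width, current_len)))
--     intervals.sort(key=lambda iv: iv[0])
--     out = []
--     for lo, hi in intervals:
--         start = out[-1] + 1 if out and lo <= out[-1] + 1 else lo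
--         out.extend(range(start, hi + 1))
--     return out
-- ===== Notes on version B (the rewrite author's own statement) =====
-- stated objective: faster
-- what changed: Instead of adding every candidate position of every group window to a set and sorting it, B builds one clamped (start,end) interval per group plus the baseline point, sorts the small interval list by start, and emits the merged union in one pass, so the output comes out sorted and deduplicated directly.
import Mathlib
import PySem

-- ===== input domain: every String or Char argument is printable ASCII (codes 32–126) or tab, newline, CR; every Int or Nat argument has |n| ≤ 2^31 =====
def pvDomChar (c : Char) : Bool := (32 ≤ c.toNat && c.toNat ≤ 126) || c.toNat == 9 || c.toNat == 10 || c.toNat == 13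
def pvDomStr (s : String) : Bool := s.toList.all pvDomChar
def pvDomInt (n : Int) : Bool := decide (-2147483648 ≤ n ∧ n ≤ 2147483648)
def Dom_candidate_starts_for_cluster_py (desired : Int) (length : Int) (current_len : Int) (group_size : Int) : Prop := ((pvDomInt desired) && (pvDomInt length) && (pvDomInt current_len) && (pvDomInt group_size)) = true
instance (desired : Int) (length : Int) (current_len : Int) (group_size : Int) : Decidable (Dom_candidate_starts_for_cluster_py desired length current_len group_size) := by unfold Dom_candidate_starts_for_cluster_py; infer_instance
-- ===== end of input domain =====

-- B replaces the per-position set + sort by an interval union: one clamped interval per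
-- group plus the baseline point, sorted by start and merged while emitting.

-- ===== PORT A =====
def candidate_starts_for_cluster_py (desired : Int) (length : Int) (current_len : Int) (group_size : Int) : List Int :=
  let candidates : PySem.Set Int := PySem.Set.ofList [max 0 (min desired current_len)]
  if group_size ≤ 0 then
    PySem.List.sorted candidates (fun x => x) false
  else
    let start_g := PySem.Int.floordiv desired group_size
    let end_g := PySem.Int.floordiv (desired + length) group_size
    let groups_to_check := PySem.List.pyRange (max 0 (start_g - 1)) (end_g + 2) 1
    let candidates := groups_to_check.foldl (fun cands g =>
      let g_start := g * group_size
      let g_end := g_start + group_size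
      let vmin := g_start
      let vmax := if length < group_size then g_end - length else g_end
      if vmax < vmin then cands
      else (PySem.List.pyRange vmin (vmax + 1) 1).foldl (fun cands s =>
        if 0 ≤ s ∧ s ≤ current_len then PySem.Set.add cands s else cands) cands) candidates
    PySem.List.sorted candidates (fun x => x) false

-- ===== PORT B =====
-- Source B's emitting merge loop: 'start = out[-1] + 1 if out and lo <= out[-1] + 1 else lo; out.extend(range(start, hi + 1))'
def pvMergeStep (out : List Int) (iv : Int × Int) : List Int :=
  let start := match out.getLast? with
    | none => iv.1
    | some last => if iv.1 ≤ last + 1 then last + 1 else iv.1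
  out ++ PySem.List.pyRange start (iv.2 + 1) 1

def candidate_starts_for_cluster_py_alt (desired : Int) (length : Int) (current_len : Int) (group_size : Int) : List Int :=
  let base := max 0 (min desired current_len)
  if group_size ≤ 0 then [base]
  else
    let g_lo := max 0 (PySem.Int.floordiv desired group_size - 1)
    let g_hi := PySem.Int.floordiv (desired + length) group_size + 1
    let width := if length ≥ group_size then group_size else group_size - length
    let intervals := (PySem.List.pyRange g_lo (g_hi + 1) 1).foldl (fun ivs g =>
      if g * group_size ≤ current_len then
        ivs ++ [(g * group_size, min (g * group_size + width) current_len)]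
      else ivs) [(base, base)]
    let intervals := PySem.List.sorted intervals (fun iv => iv.1) false
    intervals.foldl pvMergeStep []

-- ===== PRECONDITION & SPEC =====
def Spec_candidate_starts_for_cluster_py (desired : Int) (length : Int) (current_len : Int) (group_size : Int) (out : List Int) : Prop := out = candidate_starts_for_cluster_py_alt desired length current_len group_size
instance (desired : Int) (length : Int) (current_len : Int) (group_size : Int) (out : List Int) : Decidable (Spec_candidate_starts_for_cluster_py desired length current_len group_size out) := by unfold Spec_candidate_starts_for_cluster_py; infer_instance

-- ===== CLAIM (what is proved, stated in full; the proofs are below) =====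
def Claim_equal_candidate_starts_for_cluster_py : Prop := ∀ (desired : Int) (length : Int) (current_len : Int) (group_size : Int), Dom_candidate_starts_for_cluster_py desired length current_len group_size → Spec_candidate_starts_for_cluster_py desired length current_len group_size (candidate_starts_for_cluster_py desired length current_len group_size)

-- ===== LEMMAS AND PROOFS =====

-- membership after the inner loop 'for s in range(...): if 0 <= s <= current_len: candidates.add(s)'
lemma pv_mem_inner (c : Int) (l : List Int) (S : PySem.Set Int) (x : Int) :
    x ∈ l.foldl (fun cands s => if 0 ≤ s ∧ s ≤ c then PySem.Set.add cands s else cands) S ↔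
      x ∈ S ∨ (x ∈ l ∧ 0 ≤ x ∧ x ≤ c) := by
  induction l generalizing S with
  | nil => simp
  | cons a t ih =>
    simp only [List.foldl_cons, ih, List.mem_cons]
    by_cases h : 0 ≤ a ∧ a ≤ c
    · simp only [if_pos h, PySem.Set.mem_add]
      constructor
      · rintro ((hx | rfl) | hx) <;> tauto
      · rintro (hx | ⟨(rfl | hx), hy⟩) <;> tauto
    · simp only [if_neg h]
      constructor
      · rintro (hx | hx) <;> tauto
      · rintro (hx | ⟨(rfl | hx), hy⟩) <;> tauto

-- membership after A's loop over the groups to check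
lemma pv_mem_outer (length gs c : Int) (hgs : 0 < gs) (gl : List Int) (S : PySem.Set Int) (x : Int) :
    x ∈ gl.foldl (fun cands g =>
        let g_start := g * gs
        let g_end := g_start + gs
        let vmin := g_start
        let vmax := if length < gs then g_end - length else g_end
        if vmax < vmin then cands
        else (PySem.List.pyRange vmin (vmax + 1) 1).foldl (fun cands s =>
          if 0 ≤ s ∧ s ≤ c then PySem.Set.add cands s else cands) cands) S ↔
      x ∈ S ∨ ∃ g ∈ gl, g * gs ≤ x ∧
        x ≤ (if length < gs then g * gs + gs - length else g * gs + gs) ∧ 0 ≤ x ∧ x ≤ c := by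
  induction gl generalizing S with
  | nil => simp
  | cons a t ih =>
    simp only [List.foldl_cons]
    rw [ih]
    by_cases hL : length < gs
    · simp only [if_pos hL]
      rw [if_neg (not_lt.mpr (by linarith)), pv_mem_inner, PySem.List.mem_pyRange_one]
      simp only [List.exists_mem_cons_iff, Int.lt_add_one_iff]
      tauto
    · simp only [if_neg hL]
      rw [if_neg (not_lt.mpr (by linarith)), pv_mem_inner, PySem.List.mem_pyRange_one]
      simp only [List.exists_mem_cons_iff, Int.lt_add_one_iff]
      tauto

lemma pv_nodup_inner (c : Int) (l : List Int) (S : PySem.Set Int) (hS : S.Nodup) :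
    (l.foldl (fun cands s => if 0 ≤ s ∧ s ≤ c then PySem.Set.add cands s else cands) S).Nodup := by
  induction l generalizing S with
  | nil => exact hS
  | cons a t ih =>
    simp only [List.foldl_cons]
    apply ih
    split
    · exact PySem.Set.nodup_add _ _ hS
    · exact hS

lemma pv_nodup_outer (length gs c : Int) (gl : List Int) (S : PySem.Set Int) (hS : S.Nodup) :
    (gl.foldl (fun cands g =>
        let g_start := g * gs
        let g_end := g_start + gs
        let vmin := g_start
        let vmax := if length < gs then g_end - length else g_end
        if vmax < vmin then cands
        else (PySem.List.pyRange vmin (vmax + 1) 1).foldl (fun cands s =>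
          if 0 ≤ s ∧ s ≤ c then PySem.Set.add cands s else cands) cands) S).Nodup := by
  induction gl generalizing S with
  | nil => exact hS
  | cons a t ih =>
    simp only [List.foldl_cons]
    apply ih
    split <;> split <;> first | exact hS | exact pv_nodup_inner _ _ _ hS

-- A's output: strictly sorted, members = baseline plus the clamped union of windows
lemma pv_A_char (d l c gs : Int) (hgs : 0 < gs) (x : Int) :
    x ∈ candidate_starts_for_cluster_py d l c gs ↔
      (x = max 0 (min d c) ∨ ∃ g', max 0 (PySem.Int.floordiv d gs - 1) ≤ g' ∧
        g' ≤ PySem.Int.floordiv (d + l) gs + 1 ∧ g' * gs ≤ x ∧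
        x ≤ g' * gs + (if l ≥ gs then gs else gs - l) ∧ x ≤ c) := by
  simp only [candidate_starts_for_cluster_py, if_neg (not_le.mpr hgs)]
  rw [PySem.List.mem_sorted, pv_mem_outer l gs c hgs]
  simp only [PySem.Set.mem_ofList, List.mem_singleton, PySem.List.mem_pyRange_one]
  constructor
  · rintro (h | ⟨g, ⟨hg1, hg2⟩, h1, h2, h3, h4⟩)
    · exact Or.inl h
    · refine Or.inr ⟨g, hg1, by omega, h1, ?_, h4⟩
      by_cases hl : l < gs
      · rw [if_pos hl] at h2; rw [if_neg (not_le.mpr hl)]; omega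
      · rw [if_neg hl] at h2; rw [if_pos (not_lt.mp hl)]; omega
  · rintro (h | ⟨g, hg1, hg2, h1, h2, h3⟩)
    · exact Or.inl h
    · have hg0 : (0 : Int) ≤ g := le_trans (le_max_left 0 _) hg1
      have hx0 : 0 ≤ g * gs := mul_nonneg hg0 hgs.le
      refine Or.inr ⟨g, ⟨hg1, by omega⟩, h1, ?_, by omega, h3⟩
      by_cases hl : l < gs
      · rw [if_pos hl]; rw [if_neg (not_le.mpr hl)] at h2; omega
      · rw [if_neg hl]; rw [if_pos (not_lt.mp hl)] at h2; omega

lemma pv_A_pairwise (d l c gs : Int) (hgs : 0 < gs) :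
    (candidate_starts_for_cluster_py d l c gs).Pairwise (· < ·) := by
  simp only [candidate_starts_for_cluster_py, if_neg (not_le.mpr hgs)]
  refine ((PySem.List.sorted_pairwise _ _).and
    (((PySem.List.sorted_perm _ _ _).nodup_iff).mpr
      (pv_nodup_outer l gs c _ _ (PySem.Set.nodup_ofList _)))).imp ?_
  exact fun h => lt_of_le_of_ne h.1 h.2

-- in a strictly increasing list the last element bounds every member
lemma pv_getLast_max (out : List Int) (hp : out.Pairwise (· < ·)) (last : Int)
    (h : out.getLast? = some last) : last ∈ out ∧ ∀ x ∈ out, x ≤ last := by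
  induction out with
  | nil => simp at h
  | cons a t ih =>
    cases t with
    | nil =>
      simp only [List.getLast?_singleton, Option.some.injEq] at h
      subst h
      simp
    | cons b t' =>
      rw [List.getLast?_cons_cons] at h
      obtain ⟨hmem, hub⟩ := ih (List.pairwise_cons.mp hp).2 h
      have ha : a < last := (List.pairwise_cons.mp hp).1 last hmem
      refine ⟨List.mem_cons_of_mem _ hmem, ?_⟩
      intro x hx
      rcases List.mem_cons.mp hx with rfl | hx'
      · exact ha.le
      · exact hub x hx'

-- one merge step: keeps the output strictly sorted, adds exactly [lo, hi], and the
-- output still covers [lo, last] for its new last element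
lemma pv_step_props (out : List Int) (iv : Int × Int) (hp : out.Pairwise (· < ·))
    (hlohi : iv.1 ≤ iv.2)
    (hcov : ∀ last, out.getLast? = some last → ∀ x, iv.1 ≤ x → x ≤ last → x ∈ out) :
    (pvMergeStep out iv).Pairwise (· < ·) ∧
    (∀ x, x ∈ pvMergeStep out iv ↔ x ∈ out ∨ (iv.1 ≤ x ∧ x ≤ iv.2)) ∧
    (∀ last', (pvMergeStep out iv).getLast? = some last' →
        ∀ x, iv.1 ≤ x → x ≤ last' → x ∈ pvMergeStep out iv) := by
  unfold pvMergeStep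
  cases hout : out.getLast? with
  | none =>
    have hnil : out = [] := List.getLast?_eq_none_iff.mp hout
    subst hnil
    simp only [List.nil_append]
    refine ⟨PySem.List.pairwise_lt_pyRange_one _ _, ?_, ?_⟩
    · intro x
      rw [PySem.List.mem_pyRange_one]
      simp only [List.not_mem_nil, false_or]
      omega
    · intro last' hl x hx1 hx2
      rw [PySem.List.pyRange_one_succ_right hlohi, List.getLast?_concat, Option.some.injEq] at hl
      rw [PySem.List.pyRange_one_succ_right hlohi]
      simp only [List.mem_append, List.mem_singleton, PySem.List.mem_pyRange_one]
      omega
  | some last =>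
    obtain ⟨hlmem, hub⟩ := pv_getLast_max out hp last hout
    simp only
    set start := if iv.1 ≤ last + 1 then last + 1 else iv.1 with hstart
    have hstart_gt : last < start := by rw [hstart]; split <;> omega
    have hstart_ge : iv.1 ≤ start := by rw [hstart]; split <;> omega
    have hpair : (out ++ PySem.List.pyRange start (iv.2 + 1) 1).Pairwise (· < ·) := by
      apply List.pairwise_append.mpr
      refine ⟨hp, PySem.List.pairwise_lt_pyRange_one _ _, ?_⟩
      intro x hx y hy
      rw [PySem.List.mem_pyRange_one] at hy
      have := hub x hx
      omega
    have hmem : ∀ x, x ∈ out ++ PySem.List.pyRange start (iv.2 + 1) 1 ↔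
        x ∈ out ∨ (iv.1 ≤ x ∧ x ≤ iv.2) := by
      intro x
      simp only [List.mem_append, PySem.List.mem_pyRange_one]
      constructor
      · rintro (hx | hx)
        · exact Or.inl hx
        · exact Or.inr ⟨by omega, by omega⟩
      · rintro (hx | ⟨hx1, hx2⟩)
        · exact Or.inl hx
        · by_cases hge : start ≤ x
          · exact Or.inr ⟨hge, by omega⟩
          · refine Or.inl (hcov last hout x hx1 ?_)
            rw [hstart] at hge
            split at hge <;> omega
    refine ⟨hpair, hmem, ?_⟩
    intro last' hl x hx1 hx2
    by_cases hempty : iv.2 + 1 ≤ start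
    · rw [PySem.List.pyRange_one_eq_nil hempty, List.append_nil] at hl ⊢
      rw [hout, Option.some.injEq] at hl
      exact hcov last hout x hx1 (by omega)
    · rw [PySem.List.pyRange_one_succ_right (by omega : start ≤ iv.2), ← List.append_assoc,
        List.getLast?_concat, Option.some.injEq] at hl
      exact (hmem x).mpr (Or.inr ⟨hx1, by omega⟩)

-- the merge loop over start-sorted nonempty intervals: strictly sorted output whose
-- members are exactly the union of the intervals (plus the prior output)
lemma pv_merge (ivs : List (Int × Int)) (out : List Int)
    (h0 : ∀ iv ∈ ivs, iv.1 ≤ iv.2)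
    (hs : ivs.Pairwise (fun a b => a.1 ≤ b.1))
    (hp : out.Pairwise (· < ·))
    (hcov : ∀ iv ∈ ivs, ∀ last, out.getLast? = some last → ∀ x, iv.1 ≤ x → x ≤ last → x ∈ out) :
    (ivs.foldl pvMergeStep out).Pairwise (· < ·) ∧
    ∀ x, (x ∈ ivs.foldl pvMergeStep out ↔ x ∈ out ∨ ∃ iv ∈ ivs, iv.1 ≤ x ∧ x ≤ iv.2) := by
  induction ivs generalizing out with
  | nil => exact ⟨hp, by simp⟩
  | cons iv t ih =>
    obtain ⟨hhead, hs'⟩ := List.pairwise_cons.mp hs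
    obtain ⟨hp', hmem', hcov'⟩ := pv_step_props out iv hp (h0 iv List.mem_cons_self)
      (hcov iv List.mem_cons_self)
    obtain ⟨hP, hM⟩ := ih (pvMergeStep out iv)
      (fun iv' hiv' => h0 iv' (List.mem_cons_of_mem _ hiv')) hs' hp'
      (fun iv' hiv' last' hl x hx1 hx2 =>
        hcov' last' hl x (le_trans (hhead iv' hiv') hx1) hx2)
    refine ⟨hP, ?_⟩
    intro x
    rw [List.foldl_cons, hM x, hmem' x]
    simp only [List.exists_mem_cons_iff]
    tauto

-- B's output: strictly sorted, same members as A
lemma pv_B_char_pairwise (d l c gs : Int) (hgs : 0 < gs) :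
    (candidate_starts_for_cluster_py_alt d l c gs).Pairwise (· < ·) ∧
    ∀ x, (x ∈ candidate_starts_for_cluster_py_alt d l c gs ↔
      (x = max 0 (min d c) ∨ ∃ g', max 0 (PySem.Int.floordiv d gs - 1) ≤ g' ∧
        g' ≤ PySem.Int.floordiv (d + l) gs + 1 ∧ g' * gs ≤ x ∧
        x ≤ g' * gs + (if l ≥ gs then gs else gs - l) ∧ x ≤ c)) := by
  simp only [candidate_starts_for_cluster_py_alt, if_neg (not_le.mpr hgs)]
  set base := max 0 (min d c) with hbase
  set glo := max 0 (PySem.Int.floordiv d gs - 1) with hglo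
  set ghi := PySem.Int.floordiv (d + l) gs + 1 with hghi
  set w := if l ≥ gs then gs else gs - l with hw
  have hw0 : 0 < w := by rw [hw]; split <;> [omega; omega]
  have hbuild : (PySem.List.pyRange glo (ghi + 1) 1).foldl (fun ivs g =>
      if g * gs ≤ c then ivs ++ [(g * gs, min (g * gs + w) c)] else ivs) [(base, base)] =
      [(base, base)] ++ ((PySem.List.pyRange glo (ghi + 1) 1).filter
        (fun g => decide (g * gs ≤ c))).map (fun g => (g * gs, min (g * gs + w) c)) :=
    PySem.List.foldl_append_ite (fun g => g * gs ≤ c) (fun g => (g * gs, min (g * gs + w) c)) _ _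
  rw [hbuild]
  set ivs0 := [(base, base)] ++ ((PySem.List.pyRange glo (ghi + 1) 1).filter
      (fun g => decide (g * gs ≤ c))).map (fun g => (g * gs, min (g * gs + w) c)) with hivs0
  have hmem0 : ∀ iv, iv ∈ ivs0 ↔ (iv = (base, base) ∨
      ∃ g, glo ≤ g ∧ g < ghi + 1 ∧ g * gs ≤ c ∧ iv = (g * gs, min (g * gs + w) c)) := by
    intro iv
    rw [hivs0]
    simp only [List.mem_append, List.mem_singleton, List.mem_map, List.mem_filter,
      PySem.List.mem_pyRange_one, decide_eq_true_eq]
    constructor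
    · rintro (rfl | ⟨g, ⟨⟨hg1, hg2⟩, hg3⟩, rfl⟩)
      · exact Or.inl rfl
      · exact Or.inr ⟨g, hg1, hg2, hg3, rfl⟩
    · rintro (rfl | ⟨g, hg1, hg2, hg3, rfl⟩)
      · exact Or.inl rfl
      · exact Or.inr ⟨g, ⟨⟨hg1, hg2⟩, hg3⟩, rfl⟩
  have h0 : ∀ iv ∈ PySem.List.sorted ivs0 (fun iv => iv.1) false, iv.1 ≤ iv.2 := by
    intro iv hiv
    rw [PySem.List.mem_sorted, hmem0] at hiv
    rcases hiv with rfl | ⟨g, hg1, hg2, hg3, rfl⟩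
    · exact le_refl _
    · simp only
      omega
  have hs : (PySem.List.sorted ivs0 (fun iv => iv.1) false).Pairwise (fun a b => a.1 ≤ b.1) :=
    PySem.List.sorted_pairwise _ _
  obtain ⟨hP, hM⟩ := pv_merge _ [] h0 hs List.Pairwise.nil (by simp)
  refine ⟨hP, ?_⟩
  intro x
  rw [hM x]
  simp only [List.not_mem_nil, false_or]
  constructor
  · rintro ⟨iv, hiv, hx1, hx2⟩
    rw [PySem.List.mem_sorted, hmem0] at hiv
    rcases hiv with rfl | ⟨g, hg1, hg2, hg3, rfl⟩
    · exact Or.inl (by omega)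
    · simp only at hx1 hx2
      exact Or.inr ⟨g, hg1, by omega, hx1, by omega, by omega⟩
  · rintro (rfl | ⟨g, hg1, hg2, hg3, hg4, hg5⟩)
    · exact ⟨(base, base), (PySem.List.mem_sorted _ _ _ _).mpr ((hmem0 _).mpr (Or.inl rfl)),
        le_refl _, le_refl _⟩
    · refine ⟨(g * gs, min (g * gs + w) c),
        (PySem.List.mem_sorted _ _ _ _).mpr ((hmem0 _).mpr (Or.inr ⟨g, hg1, by omega, by omega, rfl⟩)),
        hg3, by simp only; omega⟩

lemma pv_sorted_lt_ext (l₁ l₂ : List Int) (h₁ : l₁.Pairwise (· < ·)) (h₂ : l₂.Pairwise (· < ·))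
    (h : ∀ x, x ∈ l₁ ↔ x ∈ l₂) : l₁ = l₂ :=
  List.Perm.eq_of_pairwise (le := (· < ·)) (fun _ _ _ _ hab hba => absurd hba (lt_asymm hab)) h₁ h₂
    ((List.perm_ext_iff_of_nodup (h₁.imp fun hab => ne_of_lt hab)
      (h₂.imp fun hab => ne_of_lt hab)).mpr h)

theorem pv_main (d l c gs : Int) :
    candidate_starts_for_cluster_py d l c gs = candidate_starts_for_cluster_py_alt d l c gs := by
  by_cases hgs0 : gs ≤ 0
  · simp only [candidate_starts_for_cluster_py, candidate_starts_for_cluster_py_alt, if_pos hgs0]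
    exact PySem.List.sorted_eq_self_of_pairwise _ _ (List.pairwise_singleton _ _)
  · have hgs : 0 < gs := by omega
    obtain ⟨hP, hM⟩ := pv_B_char_pairwise d l c gs hgs
    exact pv_sorted_lt_ext _ _ (pv_A_pairwise d l c gs hgs) hP
      (fun x => (pv_A_char d l c gs hgs x).trans (hM x).symm)

-- ===== VERDICT (by name: the statement is the Claim_ definition above) =====
theorem candidate_starts_for_cluster_py_spec : Claim_equal_candidate_starts_for_cluster_py := by
  intro d l c gs _
  unfold Spec_candidate_starts_for_cluster_py
  exact pv_main d l c gs
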